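-- pv_equiv track=rewrite | github.com/ocarl/aoc2020 | d10/p1.py | solve
-- ===== SOURCE A (Python) =====
-- def solve(data):
--     adapters = []
--     for line in data.split('\n'):
--         adapters.append(int(line))
--     adapters = sorted(adapters)
--     ones = []
--     threes = []
--     goal = max(adapters) + 3
--     curr_jolt = 0
--     adapters.append(goal)
--     diffs = []
--     for i, adapter in enumerate(adapters):
--         if i == 0:
--             diff = adapter
--         else:
--             diff = adapter - adapters[i-1]
--         if diff == 3:
--             threes.append(diff)
--         if diff == 1:
--             ones.append(diff)
--         diffs.append(diff)
--     return len(threes)*len(ones)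
-- ===== SOURCE B (Python) =====
-- def solve(data):
--     values = [int(line) for line in data.split('\n')]
--     goal = max(values) + 3
--     s = set(values)
--     s.add(0)
--     s.add(goal)
--     ones = sum(1 for x in s if x - 1 in s)
--     threes = sum(1 for x in s if x - 3 in s and x - 1 not in s and x - 2 not in s)
--     return threes * ones
-- ===== Notes on version B (the rewrite author's own statement) =====
-- stated objective: alternative
-- what changed: Replaces A's sort + adjacent-difference scan by building a hash set containing the values, 0 and max+3, and counting gaps of 1 and 3 purely by set-membership tests (no sorting, no adjacency pass).
-- outside the precondition, e.g. on solve('-3\n1'): A returns 0, B returns 2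
import Mathlib
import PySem

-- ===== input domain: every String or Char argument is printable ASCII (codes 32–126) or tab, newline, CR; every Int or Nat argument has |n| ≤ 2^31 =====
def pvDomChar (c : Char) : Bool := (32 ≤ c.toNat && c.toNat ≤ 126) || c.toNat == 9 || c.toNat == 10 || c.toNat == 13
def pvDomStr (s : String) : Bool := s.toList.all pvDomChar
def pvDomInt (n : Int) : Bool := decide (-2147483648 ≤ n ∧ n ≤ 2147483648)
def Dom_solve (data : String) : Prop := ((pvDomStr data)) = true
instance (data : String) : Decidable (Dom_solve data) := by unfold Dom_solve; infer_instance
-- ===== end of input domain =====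

-- B replaces A's sort-and-scan over adjacent differences by set-membership counting (no sort); same return value on the stated domain.

-- ===== PORT A =====
def solve (data : String) : Int :=
  let adapters : List Int :=
    ((PySem.Str.split? data "\n").getD []).foldl (fun acc line => acc ++ [(PySem.Int.ofStr? line).getD 0]) []
  let adapters := PySem.List.sorted adapters (fun x => x) false
  let goal : Int := (PySem.List.max? adapters (fun x => x)).getD 0 + 3
  let adapters := adapters ++ [goal]
  let st :=
    (PySem.List.enumerate adapters 0).foldl
      (fun (st : List Int × List Int × List Int) p =>
        let diff : Int :=
          if p.1 == 0 then p.2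
          else p.2 - (PySem.List.pyGet? adapters (p.1 - 1)).getD 0
        let threes := if diff == 3 then st.1 ++ [diff] else st.1
        let ones := if diff == 1 then st.2.1 ++ [diff] else st.2.1
        (threes, ones, st.2.2 ++ [diff]))
      ([], [], [])
  (st.1.length : Int) * (st.2.1.length : Int)

-- ===== PORT B =====
def solve_alt (data : String) : Int :=
  let values : List Int :=
    ((PySem.Str.split? data "\n").getD []).map (fun line => (PySem.Int.ofStr? line).getD 0)
  let goal : Int := (PySem.List.max? values (fun x => x)).getD 0 + 3
  let s : PySem.Set Int := PySem.Set.add (PySem.Set.add (PySem.Set.ofList values) 0) goal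
  let ones : Int := s.foldl (fun acc x => if x - 1 ∈ s then acc + 1 else acc) 0
  let threes : Int :=
    s.foldl (fun acc x => if x - 3 ∈ s ∧ x - 1 ∉ s ∧ x - 2 ∉ s then acc + 1 else acc) 0
  threes * ones

-- ===== PRECONDITION & SPEC =====
-- Pre_ excludes inputs with a line int() cannot parse (A raises ValueError there) and inputs
-- containing negative adapter values, which lie outside the puzzle's domain (with the implicit
-- 0-jolt outlet the two gap readings are equally defensible there); see claim.json cites.
def Pre_solve (data : String) : Prop :=
  ∀ line ∈ (PySem.Str.split? data "\n").getD [],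
    (PySem.Int.ofStr? line).any (fun n => decide (0 ≤ n)) = true
instance (data : String) : Decidable (Pre_solve data) := by unfold Pre_solve; infer_instance
def pvWitness_solve : String := "16\n10\n15\n5\n1\n11\n7\n19\n6\n12\n4"
def Spec_solve (data : String) (out : Int) : Prop := out = solve_alt data
instance (data : String) (out : Int) : Decidable (Spec_solve data out) := by unfold Spec_solve; infer_instance

-- ===== CLAIM (what is proved, stated in full; the proofs are below) =====
def Claim_equal_solve : Prop := ∀ (data : String), Dom_solve data → Pre_solve data → Spec_solve data (solve data)

-- ===== LEMMAS AND PROOFS =====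

-- number of adjacent pairs (a,b) with b - a = k
def adjCount (k : Int) : List Int → Nat
  | a :: b :: t => (if b - a = k then 1 else 0) + adjCount k (b :: t)
  | _ => 0

-- dedup of a sorted list: drop an element equal to its successor
def sdedup : List Int → List Int
  | a :: b :: t => if a = b then sdedup (b :: t) else a :: sdedup (b :: t)
  | l => l

theorem foldl_append_map (l : List String) (f : String → Int) (acc : List Int) :
    l.foldl (fun acc line => acc ++ [f line]) acc = acc ++ l.map f := by
  induction l generalizing acc with
  | nil => simp
  | cons h t ih => simp [List.foldl_cons, ih]

theorem countFold (p : Int → Prop) [DecidablePred p] (l : List Int) (acc : Int) :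
    l.foldl (fun a x => if p x then a + 1 else a) acc
      = acc + ((l.filter (fun x => decide (p x))).length : Int) := by
  induction l generalizing acc with
  | nil => simp
  | cons h t ih =>
    by_cases hp : p h <;> simp [List.foldl_cons, hp, ih] <;> push_cast <;> ring

theorem countFold1 (s l : List Int) (acc : Int) :
    l.foldl (fun a x => if x - 1 ∈ s then a + 1 else a) acc
      = acc + ((l.filter (fun x => decide (x - 1 ∈ s))).length : Int) :=
  countFold _ _ _

theorem countFold3 (s l : List Int) (acc : Int) :
    l.foldl (fun a x => if x - 3 ∈ s ∧ x - 1 ∉ s ∧ x - 2 ∉ s then a + 1 else a) acc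
      = acc + ((l.filter (fun x => decide (x - 3 ∈ s ∧ x - 1 ∉ s ∧ x - 2 ∉ s))).length : Int) :=
  countFold _ _ _

theorem mem_sdedup (x : Int) (l : List Int) : x ∈ sdedup l ↔ x ∈ l := by
  induction l with
  | nil => simp [sdedup]
  | cons a t ih =>
    cases t with
    | nil => simp [sdedup]
    | cons b t2 =>
      by_cases hab : a = b
      · have e : sdedup (a :: b :: t2) = sdedup (b :: t2) := by simp [sdedup, hab]
        rw [e, ih]
        subst hab
        try simp [List.mem_cons]
        try tauto
      · simp only [sdedup, if_neg hab, List.mem_cons] at ih ⊢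
        try rw [ih]
        try simp [List.mem_cons]
        try tauto

theorem sdedup_cons (t : List Int) : ∀ a : Int, ∃ t', sdedup (a :: t) = a :: t' := by
  induction t with
  | nil => intro a; exact ⟨[], rfl⟩
  | cons b t2 ih =>
    intro a
    by_cases hab : a = b
    · obtain ⟨t', ht'⟩ := ih b
      refine ⟨t', ?_⟩
      have e : sdedup (a :: b :: t2) = sdedup (b :: t2) := by simp [sdedup, hab]
      rw [e, ht', hab]
    · exact ⟨sdedup (b :: t2), by simp only [sdedup, if_neg hab]⟩

theorem nodup_sdedup (l : List Int) (h : l.Pairwise (· ≤ ·)) : (sdedup l).Pairwise (· < ·) := by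
  induction l with
  | nil => simp [sdedup]
  | cons a t ih =>
    cases t with
    | nil => simp [sdedup]
    | cons b t2 =>
      have ht : (b :: t2).Pairwise (· ≤ ·) := h.of_cons
      have ha : ∀ y ∈ b :: t2, a ≤ y := fun y hy => List.rel_of_pairwise_cons h hy
      by_cases hab : a = b
      · have e : sdedup (a :: b :: t2) = sdedup (b :: t2) := by simp [sdedup, hab]
        rw [e]
        exact ih ht
      · simp only [sdedup, if_neg hab]
        refine List.pairwise_cons.mpr ⟨?_, ih ht⟩
        intro y hy
        have hy' : y ∈ b :: t2 := (mem_sdedup y _).mp hy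
        have hb : ∀ z ∈ t2, b ≤ z := fun z hz => List.rel_of_pairwise_cons ht hz
        have hab' : a ≤ b := ha b (by simp)
        rcases List.mem_cons.mp hy' with rfl | hz
        · omega
        · have := hb y hz; omega

theorem adjCount_sdedup (k : Int) (hk : k ≠ 0) (l : List Int) :
    adjCount k (sdedup l) = adjCount k l := by
  induction l with
  | nil => rfl
  | cons a t ih =>
    cases t with
    | nil => rfl
    | cons b t2 =>
      by_cases hab : a = b
      · have e : sdedup (a :: b :: t2) = sdedup (b :: t2) := by simp [sdedup, hab]
        rw [e, ih]
        have h0 : ¬ (b - a = k) := by omega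
        simp [adjCount, h0]
      · obtain ⟨t', ht'⟩ := sdedup_cons t2 b
        have ih' := ih
        rw [ht'] at ih'
        simp only [sdedup, if_neg hab]
        rw [ht']
        simp only [adjCount]
        rw [ih']

theorem ones_count : ∀ (D : List Int), D.Pairwise (· < ·) →
    (D.filter (fun x => decide (x - 1 ∈ D))).length = adjCount 1 D := by
  intro D
  induction D with
  | nil => intro _; rfl
  | cons a t ih =>
    intro h
    have ha : ∀ y ∈ t, a < y := fun y hy => List.rel_of_pairwise_cons h hy
    have ht : t.Pairwise (· < ·) := h.of_cons
    have hheadF : (decide (a - 1 ∈ a :: t)) = false := by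
      simp only [decide_eq_false_iff_not, List.mem_cons]
      rintro (h1 | h2)
      · omega
      · exact absurd (ha _ h2) (by omega)
    rw [List.filter_cons, hheadF]
    simp only [Bool.false_eq_true, if_false]
    cases t with
    | nil => simp [adjCount]
    | cons b t2 =>
      have hb2 : ∀ z ∈ t2, b < z := fun z hz => List.rel_of_pairwise_cons ht hz
      have hab : a < b := ha b (by simp)
      by_cases hb : b = a + 1
      · have hPb : (decide (b - 1 ∈ a :: b :: t2)) = true := by
          rw [decide_eq_true_iff]
          exact List.mem_cons.mpr (Or.inl (by omega))
        have hcongr : ∀ x ∈ t2, (decide (x - 1 ∈ a :: b :: t2)) = (decide (x - 1 ∈ b :: t2)) := by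
          intro x hx
          have hxb : b < x := hb2 x hx
          apply decide_eq_decide.mpr
          simp only [List.mem_cons]
          constructor
          · rintro (h1 | h2)
            · exfalso; omega
            · exact h2
          · intro h2; right; exact h2
        have hP'b : (decide (b - 1 ∈ b :: t2)) = false := by
          simp only [decide_eq_false_iff_not, List.mem_cons]
          rintro (h1 | h2)
          · omega
          · exact absurd (hb2 _ h2) (by omega)
        have ih' := ih ht
        rw [List.filter_cons, hP'b] at ih'
        simp only [Bool.false_eq_true, if_false] at ih'
        rw [List.filter_cons, hPb]
        simp only [if_true]
        rw [List.filter_congr hcongr, List.length_cons, ih']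
        simp only [adjCount]
        rw [if_pos (by omega : b - a = 1)]
        exact Nat.add_comm _ _
      · have hcongr : ∀ x ∈ b :: t2, (decide (x - 1 ∈ a :: b :: t2)) = (decide (x - 1 ∈ b :: t2)) := by
          intro x hx
          have hxb : b ≤ x := by
            rcases List.mem_cons.mp hx with rfl | h2
            · exact le_refl _
            · exact le_of_lt (hb2 _ h2)
          apply decide_eq_decide.mpr
          simp only [List.mem_cons]
          constructor
          · rintro (h1 | h2)
            · exfalso; omega
            · exact h2
          · intro h2; right; exact h2
        rw [List.filter_congr hcongr, ih ht]
        simp only [adjCount]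
        rw [if_neg (by omega : ¬ (b - a = 1))]
        exact (Nat.zero_add _).symm

theorem threes_count : ∀ (D : List Int), D.Pairwise (· < ·) →
    (D.filter (fun x => decide (x - 3 ∈ D ∧ x - 1 ∉ D ∧ x - 2 ∉ D))).length = adjCount 3 D := by
  intro D
  induction D with
  | nil => intro _; rfl
  | cons a t ih =>
    intro h
    have ha : ∀ y ∈ t, a < y := fun y hy => List.rel_of_pairwise_cons h hy
    have ht : t.Pairwise (· < ·) := h.of_cons
    have hheadF : (decide (a - 3 ∈ a :: t ∧ a - 1 ∉ a :: t ∧ a - 2 ∉ a :: t)) = false := by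
      simp only [decide_eq_false_iff_not]
      rintro ⟨h3, -, -⟩
      rcases List.mem_cons.mp h3 with h1 | h2
      · omega
      · exact absurd (ha _ h2) (by omega)
    rw [List.filter_cons, hheadF]
    simp only [Bool.false_eq_true, if_false]
    cases t with
    | nil => simp [adjCount]
    | cons b t2 =>
      have hb2 : ∀ z ∈ t2, b < z := fun z hz => List.rel_of_pairwise_cons ht hz
      have hab : a < b := ha b (by simp)
      have hnm : ∀ m : Int, m ≤ a → m ∉ (a :: b :: t2) ∨ m = a := by
        intro m hm
        by_cases hma : m = a
        · right; exact hma
        · left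
          intro hmem
          rcases List.mem_cons.mp hmem with h1 | h2
          · exact hma h1
          · rcases List.mem_cons.mp h2 with h1 | h3
            · omega
            · exact absurd (hb2 _ h3) (by omega)
      have hnm2 : ∀ m : Int, m < b → m ∉ (b :: t2) := by
        intro m hm hmem
        rcases List.mem_cons.mp hmem with h1 | h2
        · omega
        · exact absurd (hb2 _ h2) (by omega)
      by_cases hb : b = a + 3
      · have hPb : (decide (b - 3 ∈ a :: b :: t2 ∧ b - 1 ∉ a :: b :: t2 ∧ b - 2 ∉ a :: b :: t2)) = true := by
          rw [decide_eq_true_iff]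
          refine ⟨List.mem_cons.mpr (Or.inl (by omega)), ?_, ?_⟩
          · intro hmem
            rcases List.mem_cons.mp hmem with h1 | h2
            · omega
            · rcases List.mem_cons.mp h2 with h1 | h3
              · omega
              · exact absurd (hb2 _ h3) (by omega)
          · intro hmem
            rcases List.mem_cons.mp hmem with h1 | h2
            · omega
            · rcases List.mem_cons.mp h2 with h1 | h3
              · omega
              · exact absurd (hb2 _ h3) (by omega)
        have hmemiff : ∀ m : Int, m ≠ a → (m ∈ a :: b :: t2 ↔ m ∈ b :: t2) := by
          intro m hm
          simp [List.mem_cons, hm]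
        have hcongr : ∀ x ∈ t2,
            (decide (x - 3 ∈ a :: b :: t2 ∧ x - 1 ∉ a :: b :: t2 ∧ x - 2 ∉ a :: b :: t2))
              = (decide (x - 3 ∈ b :: t2 ∧ x - 1 ∉ b :: t2 ∧ x - 2 ∉ b :: t2)) := by
          intro x hx
          have hxb : b < x := hb2 x hx
          apply decide_eq_decide.mpr
          rw [hmemiff _ (by omega), hmemiff _ (by omega), hmemiff _ (by omega)]
        have hP'b : (decide (b - 3 ∈ b :: t2 ∧ b - 1 ∉ b :: t2 ∧ b - 2 ∉ b :: t2)) = false := by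
          simp only [decide_eq_false_iff_not]
          rintro ⟨h3, -, -⟩
          exact hnm2 _ (by omega) h3
        have ih' := ih ht
        rw [List.filter_cons, hP'b] at ih'
        simp only [Bool.false_eq_true, if_false] at ih'
        rw [List.filter_cons, hPb]
        simp only [if_true]
        rw [List.filter_congr hcongr, List.length_cons, ih']
        simp only [adjCount]
        rw [if_pos (by omega : b - a = 3)]
        exact Nat.add_comm _ _
      · have hcongr : ∀ x ∈ b :: t2,
            (decide (x - 3 ∈ a :: b :: t2 ∧ x - 1 ∉ a :: b :: t2 ∧ x - 2 ∉ a :: b :: t2))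
              = (decide (x - 3 ∈ b :: t2 ∧ x - 1 ∉ b :: t2 ∧ x - 2 ∉ b :: t2)) := by
          intro x hx
          have hxb : b ≤ x := by
            rcases List.mem_cons.mp hx with rfl | h2
            · exact le_refl _
            · exact le_of_lt (hb2 _ h2)
          apply decide_eq_decide.mpr
          by_cases hx3 : x - 3 = a
          · -- x = a + 3 and b ∈ {a+1, a+2}: both sides false
            have hbr : b = a + 1 ∨ b = a + 2 := by omega
            constructor
            · rintro ⟨-, g1, g2⟩
              exfalso
              rcases hbr with rfl | rfl
              · exact g2 (List.mem_cons.mpr (Or.inr (List.mem_cons.mpr (Or.inl (by omega)))))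
              · exact g1 (List.mem_cons.mpr (Or.inr (List.mem_cons.mpr (Or.inl (by omega)))))
            · rintro ⟨g3, -, -⟩
              exfalso
              exact hnm2 _ (by omega) g3
          · by_cases hx2 : x - 2 = a
            · -- x = a + 2, so b = a + 1: both sides false
              constructor
              · rintro ⟨-, -, g2⟩
                exact absurd (List.mem_cons.mpr (Or.inl (by omega))) g2
              · rintro ⟨g3, -, -⟩
                exact absurd g3 (hnm2 _ (by omega))
            · by_cases hx1 : x - 1 = a
              · constructor
                · rintro ⟨g3, -, -⟩
                  exfalso
                  rcases List.mem_cons.mp g3 with h1 | h2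
                  · omega
                  · exact hnm2 _ (by omega) h2
                · rintro ⟨g3, -, -⟩
                  exact absurd g3 (hnm2 _ (by omega))
              · have e1 : (x - 3 ∈ a :: b :: t2 ↔ x - 3 ∈ b :: t2) := by simp [List.mem_cons, hx3]
                have e2 : (x - 1 ∈ a :: b :: t2 ↔ x - 1 ∈ b :: t2) := by simp [List.mem_cons, hx1]
                have e3 : (x - 2 ∈ a :: b :: t2 ↔ x - 2 ∈ b :: t2) := by simp [List.mem_cons, hx2]
                rw [e1, e2, e3]
        rw [List.filter_congr hcongr, ih ht]
        simp only [adjCount]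
        rw [if_neg (by omega : ¬ (b - a = 3))]
        exact (Nat.zero_add _).symm

theorem length_filter_eq_of_mem_iff (l₁ l₂ : List Int) (p : Int → Bool)
    (h₁ : l₁.Nodup) (h₂ : l₂.Nodup) (hm : ∀ x, x ∈ l₁ ↔ x ∈ l₂) :
    (l₁.filter p).length = (l₂.filter p).length := by
  have e : (l₁.filter p).toFinset = (l₂.filter p).toFinset := by
    ext x
    simp only [List.mem_toFinset, List.mem_filter]
    rw [hm x]
  have c1 : (l₁.filter p).toFinset.card = (l₁.filter p).length :=
    List.toFinset_card_of_nodup (h₁.filter p)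
  have c2 : (l₂.filter p).toFinset.card = (l₂.filter p).length :=
    List.toFinset_card_of_nodup (h₂.filter p)
  rw [← c1, ← c2, e]

theorem max_sorted_eq (vals : List Int) :
    PySem.List.max? (PySem.List.sorted vals (fun x => x) false) (fun x => x)
      = PySem.List.max? vals (fun x => x) := by
  cases h1 : PySem.List.max? (PySem.List.sorted vals (fun x => x) false) (fun x => x) with
  | none =>
    rw [PySem.List.max?_eq_none_iff] at h1
    rw [PySem.List.sorted_eq_nil_iff] at h1
    subst h1
    rfl
  | some m =>
    cases h2 : PySem.List.max? vals (fun x => x) with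
    | none =>
      rw [PySem.List.max?_eq_none_iff] at h2
      subst h2
      have hm := PySem.List.max?_mem h1
      rw [PySem.List.mem_sorted] at hm
      simp at hm
    | some m' =>
      have hm_mem : m ∈ PySem.List.sorted vals (fun x => x) false := PySem.List.max?_mem h1
      have hm'_mem : m' ∈ vals := PySem.List.max?_mem h2
      have hle1 : m ≤ m' := PySem.List.max?_isMax h2 m ((PySem.List.mem_sorted _ _ _ _).mp hm_mem)
      have hle2 : m' ≤ m := PySem.List.max?_isMax h1 m' ((PySem.List.mem_sorted _ _ _ _).mpr hm'_mem)
      rw [le_antisymm hle1 hle2]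

theorem loopA_gen (full : List Int) (t : List Int) : ∀ (n : Nat) (prev : Int)
    (s : List Int × List Int × List Int),
    full.drop n = t → 1 ≤ n → full[n-1]? = some prev →
    ((PySem.List.enumerate t (n : Int)).foldl
      (fun (st : List Int × List Int × List Int) p =>
        let diff : Int :=
          if p.1 == 0 then p.2
          else p.2 - (PySem.List.pyGet? full (p.1 - 1)).getD 0
        let threes := if diff == 3 then st.1 ++ [diff] else st.1
        let ones := if diff == 1 then st.2.1 ++ [diff] else st.2.1
        (threes, ones, st.2.2 ++ [diff])) s).1.length
      = s.1.length + adjCount 3 (prev :: t)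
  ∧ ((PySem.List.enumerate t (n : Int)).foldl
      (fun (st : List Int × List Int × List Int) p =>
        let diff : Int :=
          if p.1 == 0 then p.2
          else p.2 - (PySem.List.pyGet? full (p.1 - 1)).getD 0
        let threes := if diff == 3 then st.1 ++ [diff] else st.1
        let ones := if diff == 1 then st.2.1 ++ [diff] else st.2.1
        (threes, ones, st.2.2 ++ [diff])) s).2.1.length
      = s.2.1.length + adjCount 1 (prev :: t) := by
  induction t with
  | nil =>
    intro n prev s _ _ _
    simp [PySem.List.enumerate_nil, adjCount]
  | cons b t2 ih =>
    intro n prev s hd hn hp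
    have hne : ((n : Int) == 0) = false := by
      simp only [beq_eq_false_iff_ne, ne_eq, Int.natCast_eq_zero]
      omega
    have hidx : PySem.List.pyGet? full ((n : Int) - 1) = some prev := by
      have hc : ((n : Int) - 1) = ((n - 1 : Nat) : Int) := by omega
      rw [hc, PySem.List.pyGet?_natCast, hp]
    have hd' : full.drop (n + 1) = t2 := by
      have h := congrArg (List.drop 1) hd
      rw [List.drop_drop] at h
      simpa using h
    have hp' : full[(n+1)-1]? = some b := by
      have h := congrArg (fun l => l[0]?) hd
      simp only [List.getElem?_drop, Nat.add_zero] at h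
      simpa using h
    have hc1 : ((n + 1 : Nat) : Int) = (n : Int) + 1 := by push_cast; ring
    obtain ⟨ih1, ih2⟩ := ih (n + 1) b
      ((if ((b - prev) == 3) = true then s.1 ++ [b - prev] else s.1),
       (if ((b - prev) == 1) = true then s.2.1 ++ [b - prev] else s.2.1),
       s.2.2 ++ [b - prev]) hd' (by omega) hp'
    rw [hc1] at ih1 ih2
    constructor
    · rw [PySem.List.enumerate_cons, List.foldl_cons]
      simp only [hne, Bool.false_eq_true, if_false, hidx, Option.getD_some]
      rw [ih1]
      by_cases h3 : b - prev = 3 <;>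
        simp only [adjCount, h3, beq_iff_eq, if_pos, if_neg, List.length_append,
          List.length_cons, List.length_nil] <;>
        simp [h3] <;> omega
    · rw [PySem.List.enumerate_cons, List.foldl_cons]
      simp only [hne, Bool.false_eq_true, if_false, hidx, Option.getD_some]
      rw [ih2]
      by_cases h1 : b - prev = 1 <;>
        simp only [adjCount, h1, beq_iff_eq, if_pos, if_neg, List.length_append,
          List.length_cons, List.length_nil] <;>
        simp [h1] <;> omega

theorem loopA (a : Int) (rest : List Int) :
    ((PySem.List.enumerate (a :: rest) (0 : Int)).foldl
      (fun (st : List Int × List Int × List Int) p =>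
        let diff : Int :=
          if p.1 == 0 then p.2
          else p.2 - (PySem.List.pyGet? (a :: rest) (p.1 - 1)).getD 0
        let threes := if diff == 3 then st.1 ++ [diff] else st.1
        let ones := if diff == 1 then st.2.1 ++ [diff] else st.2.1
        (threes, ones, st.2.2 ++ [diff])) ([], [], [])).1.length
      = adjCount 3 (0 :: a :: rest)
  ∧ ((PySem.List.enumerate (a :: rest) (0 : Int)).foldl
      (fun (st : List Int × List Int × List Int) p =>
        let diff : Int :=
          if p.1 == 0 then p.2
          else p.2 - (PySem.List.pyGet? (a :: rest) (p.1 - 1)).getD 0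
        let threes := if diff == 3 then st.1 ++ [diff] else st.1
        let ones := if diff == 1 then st.2.1 ++ [diff] else st.2.1
        (threes, ones, st.2.2 ++ [diff])) ([], [], [])).2.1.length
      = adjCount 1 (0 :: a :: rest) := by
  have hc1 : ((1 : Nat) : Int) = (0 : Int) + 1 := by norm_num
  obtain ⟨ih1, ih2⟩ := loopA_gen (a :: rest) rest 1 a
    ((if ((a : Int) == 3) = true then ([] : List Int) ++ [a] else []),
     (if ((a : Int) == 1) = true then ([] : List Int) ++ [a] else []),
     ([] : List Int) ++ [a]) rfl (le_refl 1) (by simp)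
  rw [hc1] at ih1 ih2
  constructor
  · rw [PySem.List.enumerate_cons, List.foldl_cons]
    simp only [show ((0 : Int) == 0) = true from rfl, if_true]
    rw [ih1]
    by_cases h3 : a = 3 <;>
      simp [adjCount, h3] <;> omega
  · rw [PySem.List.enumerate_cons, List.foldl_cons]
    simp only [show ((0 : Int) == 0) = true from rfl, if_true]
    rw [ih2]
    by_cases h1 : a = 1 <;>
      simp [adjCount, h1] <;> omega

theorem solve_equiv (vals : List Int) (hv : ∀ v ∈ vals, 0 ≤ v) :
    (let L := PySem.List.sorted vals (fun x => x) false
     let goal : Int := (PySem.List.max? L (fun x => x)).getD 0 + 3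
     let adapters := L ++ [goal]
     let st := (PySem.List.enumerate adapters 0).foldl
       (fun (st : List Int × List Int × List Int) p =>
         let diff : Int :=
           if p.1 == 0 then p.2
           else p.2 - (PySem.List.pyGet? adapters (p.1 - 1)).getD 0
         let threes := if diff == 3 then st.1 ++ [diff] else st.1
         let ones := if diff == 1 then st.2.1 ++ [diff] else st.2.1
         (threes, ones, st.2.2 ++ [diff])) ([], [], [])
     (st.1.length : Int) * (st.2.1.length : Int))
    = (let goal : Int := (PySem.List.max? vals (fun x => x)).getD 0 + 3
       let s : PySem.Set Int := PySem.Set.add (PySem.Set.add (PySem.Set.ofList vals) 0) goal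
       let ones : Int := s.foldl (fun acc x => if x - 1 ∈ s then acc + 1 else acc) 0
       let threes : Int :=
         s.foldl (fun acc x => if x - 3 ∈ s ∧ x - 1 ∉ s ∧ x - 2 ∉ s then acc + 1 else acc) 0
       threes * ones) := by
  dsimp only
  rw [max_sorted_eq]
  generalize hL : PySem.List.sorted vals (fun x => x) false = L
  have hsort : L.Pairwise (· ≤ ·) := by
    rw [← hL]
    simpa using PySem.List.sorted_pairwise vals (fun x => x)
  have hLmem : ∀ x : Int, x ∈ L ↔ x ∈ vals := by
    intro x; rw [← hL]; exact PySem.List.mem_sorted vals (fun x => x) false x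
  generalize hg : (PySem.List.max? vals (fun x => x)).getD 0 + 3 = g
  have hgmax : ∀ y ∈ vals, y + 3 ≤ g := by
    intro y hy
    cases hmx : PySem.List.max? vals (fun x => x) with
    | none =>
      rw [PySem.List.max?_eq_none_iff] at hmx
      subst hmx
      simp at hy
    | some m =>
      have := PySem.List.max?_isMax hmx y hy
      rw [hmx] at hg
      simp only [Option.getD_some] at hg
      omega
  have hg0 : 0 ≤ g := by
    cases hmx : PySem.List.max? vals (fun x => x) with
    | none =>
      rw [hmx] at hg
      simp only [Option.getD_none] at hg
      omega
    | some m =>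
      have hmem := PySem.List.max?_mem hmx
      have := hv m hmem
      rw [hmx] at hg
      simp only [Option.getD_some] at hg
      omega
  have hfullsorted : (0 :: (L ++ [g])).Pairwise (· ≤ ·) := by
    refine List.pairwise_cons.mpr ⟨?_, ?_⟩
    · intro y hy
      rcases List.mem_append.mp hy with h | h
      · exact hv y ((hLmem y).mp h)
      · simp only [List.mem_singleton] at h; omega
    · refine List.pairwise_append.mpr ⟨hsort, List.pairwise_singleton _ _, ?_⟩
      intro x hx y hy
      simp only [List.mem_singleton] at hy
      subst hy
      have := hgmax x ((hLmem x).mp hx)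
      omega
  cases L with
  | nil =>
    have hvals : vals = [] := by
      rw [PySem.List.sorted_eq_nil_iff] at hL
      exact hL
    subst hvals
    rw [← hg]
    decide
  | cons a L' =>
    simp only [List.cons_append]
    obtain ⟨h3len, h1len⟩ := loopA a (L' ++ [g])
    rw [h3len, h1len]
    rw [countFold1, countFold3]
    rw [List.cons_append] at hfullsorted
    have hD := nodup_sdedup _ hfullsorted
    have hDnodup : (sdedup (0 :: a :: (L' ++ [g]))).Nodup :=
      (hD.imp (fun h => ne_of_lt h))
    have hSnodup : (PySem.Set.add (PySem.Set.add (PySem.Set.ofList vals) 0) g).Nodup :=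
      PySem.Set.nodup_add _ _ (PySem.Set.nodup_add _ _ (PySem.Set.nodup_ofList vals))
    have hmemD : ∀ x : Int,
        (x ∈ PySem.Set.add (PySem.Set.add (PySem.Set.ofList vals) 0) g
          ↔ x ∈ sdedup (0 :: a :: (L' ++ [g]))) := by
      intro x
      rw [mem_sdedup]
      rw [PySem.Set.mem_add, PySem.Set.mem_add, PySem.Set.mem_ofList]
      have hx : x ∈ (0 : Int) :: a :: (L' ++ [g]) ↔ (x = 0 ∨ x ∈ a :: L' ∨ x = g) := by
        simp only [List.mem_cons, List.mem_append, List.mem_singleton]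
        tauto
      rw [hx]
      rw [show (x ∈ a :: L' ↔ x ∈ vals) from hLmem x]
      tauto
    have hpred1 : (fun x : Int => decide (x - 1 ∈ PySem.Set.add (PySem.Set.add (PySem.Set.ofList vals) 0) g))
        = (fun x : Int => decide (x - 1 ∈ sdedup (0 :: a :: (L' ++ [g])))) :=
      funext fun x => decide_eq_decide.mpr (hmemD _)
    have hpred3 : (fun x : Int => decide
          (x - 3 ∈ PySem.Set.add (PySem.Set.add (PySem.Set.ofList vals) 0) g
            ∧ x - 1 ∉ PySem.Set.add (PySem.Set.add (PySem.Set.ofList vals) 0) g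
            ∧ x - 2 ∉ PySem.Set.add (PySem.Set.add (PySem.Set.ofList vals) 0) g))
        = (fun x : Int => decide
          (x - 3 ∈ sdedup (0 :: a :: (L' ++ [g]))
            ∧ x - 1 ∉ sdedup (0 :: a :: (L' ++ [g]))
            ∧ x - 2 ∉ sdedup (0 :: a :: (L' ++ [g])))) :=
      funext fun x => decide_eq_decide.mpr (by rw [hmemD, hmemD, hmemD])
    rw [hpred1, hpred3]
    rw [length_filter_eq_of_mem_iff _ (sdedup (0 :: a :: (L' ++ [g]))) _ hSnodup hDnodup hmemD]
    rw [length_filter_eq_of_mem_iff _ (sdedup (0 :: a :: (L' ++ [g]))) _ hSnodup hDnodup hmemD]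
    rw [ones_count _ hD, threes_count _ hD]
    rw [adjCount_sdedup 1 (by norm_num), adjCount_sdedup 3 (by norm_num)]
    push_cast
    ring

-- ===== VERDICT (by name: the statement is the Claim_ definition above) =====
theorem solve_spec : Claim_equal_solve := by
  intro data _ hpre
  show solve data = solve_alt data
  unfold solve solve_alt
  rw [foldl_append_map, List.nil_append]
  refine solve_equiv _ ?_
  intro v hvm
  obtain ⟨line, hline, rfl⟩ := List.mem_map.mp hvm
  have hp := hpre line hline
  cases hof : PySem.Int.ofStr? line with
  | none => rw [hof] at hp; simp [Option.any] at hp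
  | some n =>
    rw [hof] at hp
    simp only [Option.any, decide_eq_true_eq] at hp
    simp [hof, hp]
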